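-- pv_equiv track=rewrite | github.com/numbbvi/test-mcp | MCP-SCAN/scanner/analyzers/rules/typescript/path_traversal.py | _trace_data_flow_path
-- ===== SOURCE A (Python) =====
-- from typing import List, Dict, Set, Any
--
-- def _trace_data_flow_path(var_name: str, flow_graph: Dict[str, Set[str]],
--                           tainted_vars: Set[str], max_depth: int = 5) -> str:
--     if max_depth <= 0:
--         return ""
--
--     path = []
--     visited = set()
--
--     def trace(current_var: str, depth: int) -> bool:
--         if depth > max_depth or current_var in visited:
--             return False
--
--         visited.add(current_var)
--
--         if current_var in tainted_vars:
--             path.append(current_var)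
--             return True
--
--         for from_var, to_vars in flow_graph.items():
--             if current_var in to_vars:
--                 if trace(from_var, depth + 1):
--                     path.append(f"{from_var} -> {current_var}")
--                     return True
--
--         return False
--
--     trace(var_name, 0)
--     return " -> ".join(reversed(path)) if path else ""
-- ===== SOURCE B (Python) =====
-- def _trace_data_flow_path(var_name, flow_graph, tainted_vars, max_depth=5):
--     if max_depth <= 0:
--         return ""
--
--     # Reverse adjacency index built once (flow_graph iteration order preserved).
--     rev = {}
--     for from_var, to_vars in flow_graph.items():
--         for t in to_vars:
--             rev.setdefault(t, []).append(from_var)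
--
--     visited = set()
--
--     def trace(cur, depth):
--         # Returns the list of path segments already in output order, or None.
--         if depth > max_depth or cur in visited:
--             return None
--         visited.add(cur)
--         if cur in tainted_vars:
--             return [cur]
--         for fv in rev.get(cur, []):
--             segs = trace(fv, depth + 1)
--             if segs is not None:
--                 return [f"{fv} -> {cur}"] + segs
--         return None
--
--     segs = trace(var_name, 0)
--     return " -> ".join(segs) if segs else ""
-- ===== Notes on version B (the rewrite author's own statement) =====
-- stated objective: alternative
-- what changed: B precomputes a reverse-adjacency index once so the DFS walks only actual predecessors instead of rescanning every flow_graph item, and the DFS returns an Option segment list built directly in output order (cons at the front, no mutable path accumulator, no final reversal).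
import Mathlib
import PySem

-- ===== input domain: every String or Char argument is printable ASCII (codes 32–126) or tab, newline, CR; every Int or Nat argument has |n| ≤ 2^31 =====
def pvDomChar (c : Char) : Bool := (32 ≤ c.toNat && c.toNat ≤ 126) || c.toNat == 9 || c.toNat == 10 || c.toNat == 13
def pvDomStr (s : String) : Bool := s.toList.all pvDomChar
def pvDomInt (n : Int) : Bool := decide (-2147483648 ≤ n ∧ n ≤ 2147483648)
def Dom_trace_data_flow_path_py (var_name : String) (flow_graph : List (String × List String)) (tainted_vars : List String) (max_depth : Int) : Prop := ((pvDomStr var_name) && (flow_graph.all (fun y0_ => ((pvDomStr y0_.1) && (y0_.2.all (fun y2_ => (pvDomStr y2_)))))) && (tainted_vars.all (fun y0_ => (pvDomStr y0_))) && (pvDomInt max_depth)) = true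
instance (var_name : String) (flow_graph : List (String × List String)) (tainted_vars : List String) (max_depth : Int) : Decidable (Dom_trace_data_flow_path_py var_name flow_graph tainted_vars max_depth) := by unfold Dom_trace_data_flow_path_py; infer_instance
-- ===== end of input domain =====

-- B builds a reverse-adjacency index once and its DFS returns an optional segment list already in
-- output order (cons-built, no path accumulator, no reversal); same return value as A.

-- ===== PORT A =====
-- A's recursion carried with fuel = (max_depth + 1 - depth).toNat, so fuel = 0 iff depth > max_depth.
mutual
def pvTraceA (fg : List (String × List String)) (tv : List String)
    (fuel : Nat) (cur : String) (vis : PySem.Set String) (path : List String) :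
    Bool × PySem.Set String × List String :=
  match fuel with
  | 0 => (false, vis, path)                                   -- depth > max_depth
  | Nat.succ f =>
    if PySem.Set.contains vis cur then (false, vis, path)
    else
      let vis' := PySem.Set.add vis cur
      if tv.contains cur then (true, vis', path ++ [cur])
      else pvLoopA fg tv f cur fg vis' path
  termination_by (fuel, 0)

-- the 'for from_var, to_vars in flow_graph.items()' scan inside trace
def pvLoopA (fg : List (String × List String)) (tv : List String) (f : Nat) (cur : String)
    (l : List (String × List String)) (vis : PySem.Set String) (path : List String) :
    Bool × PySem.Set String × List String :=
  match l with
  | [] => (false, vis, path)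
  | (fv, tvs) :: rest =>
    if tvs.contains cur then
      match pvTraceA fg tv f fv vis path with
      | (true, vis', path') => (true, vis', path' ++ [fv ++ " -> " ++ cur])
      | (false, vis', path') => pvLoopA fg tv f cur rest vis' path'
    else pvLoopA fg tv f cur rest vis path
  termination_by (f, l.length + 1)
end

def trace_data_flow_path_py (var_name : String) (flow_graph : List (String × List String)) (tainted_vars : List String) (max_depth : Int) : String :=
  if max_depth ≤ 0 then ""
  else
    let r := pvTraceA flow_graph tainted_vars (max_depth + 1).toNat var_name PySem.Set.empty []
    if r.2.2 = [] then "" else PySem.Str.join " -> " r.2.2.reverse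

-- ===== PORT B =====
-- rev.setdefault(t, []).append(from_var) over each to_vars set (Python set value => PySem.Set.ofList)
def pvBuildRev (fg : List (String × List String)) : PySem.Dict String (List String) :=
  fg.foldl (fun d p =>
    (PySem.Set.ofList p.2).foldl (fun d t => d.modify t [] (· ++ [p.1])) d) PySem.Dict.empty

-- Source B's trace: returns (segment list in final output order, or none; the visited set).
-- The 'for fv in rev.get(cur, [])' loop with early return is the short-circuiting foldl.
def pvTraceB (rev : PySem.Dict String (List String)) (tv : List String) :
    Nat → String → PySem.Set String → Option (List String) × PySem.Set String
  | 0, _, vis => (none, vis)                                  -- depth > max_depth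
  | Nat.succ f, cur, vis =>
    if PySem.Set.contains vis cur then (none, vis)
    else
      let vis' := PySem.Set.add vis cur
      if tv.contains cur then (some [cur], vis')
      else
        (rev.getD cur []).foldl
          (fun st fv =>
            match st with
            | (some segs, v) => (some segs, v)                -- already returned
            | (none, v) =>
              match pvTraceB rev tv f fv v with
              | (some segs, v') => (some ((fv ++ " -> " ++ cur) :: segs), v')
              | (none, v') => (none, v'))
          (none, vis')

def trace_data_flow_path_py_alt (var_name : String) (flow_graph : List (String × List String)) (tainted_vars : List String) (max_depth : Int) : String :=
  if max_depth ≤ 0 then ""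
  else
    let rev := pvBuildRev flow_graph
    match (pvTraceB rev tainted_vars (max_depth + 1).toNat var_name PySem.Set.empty).1 with
    | none => ""
    | some segs => if segs.isEmpty then "" else PySem.Str.join " -> " segs

-- ===== PRECONDITION & SPEC =====
def Spec_trace_data_flow_path_py (var_name : String) (flow_graph : List (String × List String)) (tainted_vars : List String) (max_depth : Int) (out : String) : Prop := out = trace_data_flow_path_py_alt var_name flow_graph tainted_vars max_depth
instance (var_name : String) (flow_graph : List (String × List String)) (tainted_vars : List String) (max_depth : Int) (out : String) : Decidable (Spec_trace_data_flow_path_py var_name flow_graph tainted_vars max_depth out) := by unfold Spec_trace_data_flow_path_py; infer_instance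

-- ===== CLAIM (what is proved, stated in full; the proofs are below) =====
def Claim_equal_trace_data_flow_path_py : Prop := ∀ (var_name : String) (flow_graph : List (String × List String)) (tainted_vars : List String) (max_depth : Int), Dom_trace_data_flow_path_py var_name flow_graph tainted_vars max_depth → Spec_trace_data_flow_path_py var_name flow_graph tainted_vars max_depth (trace_data_flow_path_py var_name flow_graph tainted_vars max_depth)

-- ===== LEMMAS AND PROOFS =====
-- a Nodup list filtered for equality with cur
lemma pv_filter_nodup {l : List String} (h : l.Nodup) (cur : String) :
    l.filter (fun t => t == cur) = if cur ∈ l then [cur] else [] := by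
  induction l with
  | nil => simp
  | cons a rest ih =>
    rcases List.nodup_cons.mp h with ⟨ha, hrest⟩
    by_cases hac : a = cur
    · subst hac
      simp [ih hrest, ha]
    · simp [hac, ih hrest, Ne.symm hac]

-- one inner loop of pvBuildRev appends the from-var to rev[cur] exactly when cur ∈ tvs
lemma pvBuildRev_inner (tvs : List String) (fv cur : String) (d : PySem.Dict String (List String)) :
    ((PySem.Set.ofList tvs).foldl (fun d t => d.modify t [] (· ++ [fv])) d).getD cur []
      = d.getD cur [] ++ (if tvs.contains cur then [fv] else []) := by
  have h1 : (PySem.Set.ofList tvs).foldl (fun d t => d.modify t [] (· ++ [fv])) d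
      = ((PySem.Set.ofList tvs).map (fun t => (t, fv))).foldl (fun d p => d.modify p.1 [] (· ++ [p.2])) d := by
    rw [List.foldl_map]
  rw [h1, PySem.Dict.getD_foldl_modify_append, List.filter_map, List.map_map]
  have h2 : (PySem.Set.ofList tvs).filter (fun t => t == cur)
      = if cur ∈ tvs then [cur] else [] := by
    rw [pv_filter_nodup (PySem.Set.nodup_ofList tvs) cur]
    simp [PySem.Set.mem_ofList]
  simp only [Function.comp_def, h2]
  by_cases h : cur ∈ tvs <;> simp [h]

lemma pvBuildRev_getD_gen (fg : List (String × List String)) (cur : String)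
    (d : PySem.Dict String (List String)) :
    (fg.foldl (fun d p => (PySem.Set.ofList p.2).foldl (fun d t => d.modify t [] (· ++ [p.1])) d) d).getD cur []
      = d.getD cur [] ++ (fg.filter (fun p => p.2.contains cur)).map Prod.fst := by
  induction fg generalizing d with
  | nil => simp
  | cons p rest ih =>
    simp only [List.foldl_cons, ih, pvBuildRev_inner, List.filter_cons]
    by_cases h : cur ∈ p.2 <;> simp [h]

lemma pvBuildRev_getD (fg : List (String × List String)) (cur : String) :
    (pvBuildRev fg).getD cur [] = (fg.filter (fun p => p.2.contains cur)).map Prod.fst := by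
  unfold pvBuildRev
  rw [pvBuildRev_getD_gen]
  simp

-- B's fold is a no-op once the state carries a result
lemma pvFoldB_some (rev : PySem.Dict String (List String)) (tv : List String) (f : Nat) (cur : String)
    (l : List String) (segs : List String) (v : PySem.Set String) :
    l.foldl
      (fun st fv =>
        match st with
        | (some segs, v) => (some segs, v)
        | (none, v) =>
          match pvTraceB rev tv f fv v with
          | (some segs, v') => (some ((fv ++ " -> " ++ cur) :: segs), v')
          | (none, v') => (none, v')) (some segs, v) = (some segs, v) := by
  induction l with
  | nil => rfl
  | cons a rest ih => simpa using ih

-- relation between A's (flag, visited, accumulated path) and B's (optional segs, visited)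
lemma pvTrace_rel (fg : List (String × List String)) (tv : List String) :
    ∀ (f : Nat) (cur : String) (vis : PySem.Set String) (path : List String),
      pvTraceA fg tv f cur vis path
        = ((pvTraceB (pvBuildRev fg) tv f cur vis).1.isSome,
           (pvTraceB (pvBuildRev fg) tv f cur vis).2,
           path ++ ((pvTraceB (pvBuildRev fg) tv f cur vis).1.getD []).reverse) := by
  intro f
  induction f with
  | zero => intro cur vis path; rw [pvTraceA, pvTraceB]; simp
  | succ f ih =>
    intro cur vis path
    rw [pvTraceA, pvTraceB]
    split_ifs with h1 h2
    · simp
    · simp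
    · rw [pvBuildRev_getD]
      -- the inner scan: induction over the flow-graph list being scanned
      have loop : ∀ (l : List (String × List String)) (vis : PySem.Set String) (path : List String),
            pvLoopA fg tv f cur l vis path
              = (let st := ((l.filter (fun p => p.2.contains cur)).map Prod.fst).foldl
                  (fun st fv =>
                    match st with
                    | (some segs, v) => (some segs, v)
                    | (none, v) =>
                      match pvTraceB (pvBuildRev fg) tv f fv v with
                      | (some segs, v') => (some ((fv ++ " -> " ++ cur) :: segs), v')
                      | (none, v') => (none, v')) (none, vis);
                 (st.1.isSome, st.2, path ++ (st.1.getD []).reverse)) := by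
          intro l
          induction l with
          | nil => intro vis path; simp [pvLoopA]
          | cons p rest ihl =>
            intro vis path
            obtain ⟨fv, tvs⟩ := p
            by_cases hc : tvs.contains cur
            · rw [pvLoopA, if_pos hc]
              simp only [List.filter_cons, hc, if_true, List.map_cons, List.foldl_cons]
              rw [ih fv vis path]
              rcases hB : pvTraceB (pvBuildRev fg) tv f fv vis with ⟨o, v'⟩
              cases o with
              | some segs =>
                simp only [Option.isSome_some, Option.getD_some]
                rw [pvFoldB_some]
                simp [List.append_assoc]
              | none =>
                simp only [Option.isSome_none, Option.getD_none, List.reverse_nil,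
                  List.append_nil]
                exact ihl v' path
            · rw [pvLoopA, if_neg hc]
              simp only [List.filter_cons, hc, Bool.false_eq_true, if_false]
              exact ihl vis path
      simpa using loop fg (PySem.Set.add vis cur) path

-- ===== VERDICT (by name: the statement is the Claim_ definition above) =====
theorem trace_data_flow_path_py_spec : Claim_equal_trace_data_flow_path_py := by
  intro vn fg tv md _
  unfold Spec_trace_data_flow_path_py trace_data_flow_path_py trace_data_flow_path_py_alt
  by_cases h : md ≤ 0
  · simp [h]
  · simp only [h, if_false]
    rw [pvTrace_rel]
    rcases hB : (pvTraceB (pvBuildRev fg) tv (md + 1).toNat vn PySem.Set.empty).1 with _ | segs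
    · simp
    · simp only [Option.getD_some]
      rcases segs with _ | ⟨s, rest⟩
      · simp
      · simp [List.isEmpty_cons]
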